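-- pv_equiv track=rewrite | github.com/shadowazer/grafical-Nim | pygame_testing.py | kasvoiduseis
-- ===== SOURCE A (Python) =====
-- pik = 8
--
-- def seis2bitijada(seis):
--     tulemus = []
--     for x in seis:
--         tulemus.append(bitijada(x))
--     return tulemus
--
-- def kasvoiduseis(seis):
--     kahendsusteem = seis2bitijada(seis)
--     summad = []
--     for pos in range(pik):
--         summa = 0
--         for jada in kahendsusteem:
--             summa += jada[pos]
--         summad.append(summa % 2)
--     return max(summad) == 1
--
-- def bitijada(arv):
--     tulemus = []
--     for i in range(pik):
--         tulemus.append(arv % 2)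
--         arv = arv // 2
--     return tulemus
-- ===== SOURCE B (Python) =====
-- def kasvoiduseis(seis):
--     # Single-pass XOR accumulator over the low 8 bits of each element:
--     # per-bit parity of the counts equals the bits of the running XOR.
--     acc = 0
--     for x in seis:
--         acc ^= x % 256
--     return acc != 0
-- ===== Notes on version B (the rewrite author's own statement) =====
-- stated objective: faster
-- what changed: Replaces the per-element 8-bit table (bitijada), the per-position nested summation loop and the final max scan by a single pass that XORs each element's low 8 bits (x % 256) into one accumulator and tests it for zero.
import Mathlib
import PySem

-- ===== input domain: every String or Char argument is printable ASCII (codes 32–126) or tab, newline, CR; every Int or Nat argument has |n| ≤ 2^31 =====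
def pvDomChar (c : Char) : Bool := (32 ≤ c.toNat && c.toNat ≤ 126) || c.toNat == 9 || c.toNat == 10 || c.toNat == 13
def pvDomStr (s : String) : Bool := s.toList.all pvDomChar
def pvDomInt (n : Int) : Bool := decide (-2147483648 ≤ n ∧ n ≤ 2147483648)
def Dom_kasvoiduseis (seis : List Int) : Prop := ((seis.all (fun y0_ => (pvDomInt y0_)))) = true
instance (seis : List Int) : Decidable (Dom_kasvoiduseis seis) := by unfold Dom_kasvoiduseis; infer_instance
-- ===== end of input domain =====

-- B replaces A's per-element 8-bit table, per-position nested parity sums and final max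
-- by one pass XOR-ing each element's low 8 bits into a single accumulator (objective: faster, constant-factor).


-- ===== PORT A =====
def pik : Int := 8

def bitijada (arv : Int) : List Int :=
  ((PySem.List.pyRange 0 pik 1).foldl
    (fun (st : List Int × Int) _ =>
      (st.1 ++ [PySem.Int.mod st.2 2], PySem.Int.floordiv st.2 2))
    ([], arv)).1

def seis2bitijada (seis : List Int) : List (List Int) :=
  seis.foldl (fun tulemus x => tulemus ++ [bitijada x]) []

def kasvoiduseis (seis : List Int) : Bool :=
  let kahendsusteem := seis2bitijada seis
  let summad := (PySem.List.pyRange 0 pik 1).foldl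
    (fun summad pos =>
      summad ++ [PySem.Int.mod
        (kahendsusteem.foldl
          (fun summa jada => summa + (PySem.List.pyGet? jada pos).getD 0) 0) 2]) []
  -- jada[pos] never raises here (every jada has length pik and 0 ≤ pos < pik), so .getD 0 is exact
  decide ((PySem.List.max? summad (fun y => y)).getD 0 = 1)

-- ===== PORT B =====
def kasvoiduseis_alt (seis : List Int) : Bool :=
  decide (seis.foldl (fun acc x => PySem.Int.bxor acc (PySem.Int.mod x 256)) 0 ≠ 0)

-- ===== PRECONDITION & SPEC =====
def Spec_kasvoiduseis (seis : List Int) (out : Bool) : Prop := out = kasvoiduseis_alt seis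
instance (seis : List Int) (out : Bool) : Decidable (Spec_kasvoiduseis seis out) := by unfold Spec_kasvoiduseis; infer_instance

-- ===== CLAIM (what is proved, stated in full; the proofs are below) =====
def Claim_equal_kasvoiduseis : Prop := ∀ (seis : List Int), Dom_kasvoiduseis seis → Spec_kasvoiduseis seis (kasvoiduseis seis)

-- ===== LEMMAS AND PROOFS =====

/-- the low 8 bits of `x`, Python's `x % 256`, as a natural number -/
def pvR (x : Int) : Nat := (PySem.Int.mod x 256).toNat

/-- B's accumulator on the Nat side -/
def pvX (seis : List Int) : Nat := seis.foldl (fun a x => a ^^^ pvR x) 0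

theorem pvR_lt (x : Int) : pvR x < 256 := by
  have h1 := PySem.Int.mod_nonneg x (show (0:Int) < 256 by norm_num)
  have h2 := PySem.Int.mod_lt x (show (0:Int) < 256 by norm_num)
  unfold pvR; omega

theorem pvMod_eq_cast (x : Int) : PySem.Int.mod x 256 = ((pvR x : Nat) : Int) := by
  unfold pvR
  rw [Int.toNat_of_nonneg (PySem.Int.mod_nonneg x (by norm_num))]

theorem alt_foldl (seis : List Int) : ∀ a : Nat,
    seis.foldl (fun acc x => PySem.Int.bxor acc (PySem.Int.mod x 256)) (a : Int)
      = ((seis.foldl (fun acc x => acc ^^^ pvR x) a : Nat) : Int) := by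
  induction seis with
  | nil => intro a; simp
  | cons x t ih =>
    intro a
    simp only [List.foldl_cons]
    rw [show PySem.Int.bxor (a:Int) (PySem.Int.mod x 256) = (((a ^^^ pvR x : Nat) : Int)) by
      rw [pvMod_eq_cast, PySem.Int.bxor_natCast]]
    exact ih _

theorem pvX_foldl_lt (seis : List Int) : ∀ a : Nat, a < 256 →
    seis.foldl (fun acc x => acc ^^^ pvR x) a < 256 := by
  induction seis with
  | nil => intro a ha; simpa using ha
  | cons x t ih =>
    intro a ha
    refine ih _ ?_
    have h8 : (256:Nat) = 2 ^ 8 := by norm_num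
    rw [h8] at ha ⊢
    exact Nat.xor_lt_two_pow ha (h8 ▸ pvR_lt x)

theorem pvX_lt (seis : List Int) : pvX seis < 256 := pvX_foldl_lt seis 0 (by norm_num)

theorem parity_foldl (i : Nat) (l : List Int) : ∀ a : Nat,
    (l.foldl (fun acc x => acc ^^^ pvR x) a).testBit i
      = ((decide (((l.map (fun x => if (pvR x).testBit i then (1:Int) else 0)).sum) % 2 = 1)).xor (a.testBit i)) := by
  induction l with
  | nil => intro a; simp
  | cons x t ih =>
    intro a
    simp only [List.foldl_cons, List.map_cons, List.sum_cons]
    rw [ih, Nat.testBit_xor]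
    by_cases h : (pvR x).testBit i = true
    · simp only [h]
      cases hb : a.testBit i <;>
        cases hd : decide ((t.map (fun x => if (pvR x).testBit i then (1:Int) else 0)).sum % 2 = 1) <;>
          simp [hb, hd] <;>
          simp only [decide_eq_true_eq, decide_eq_false_iff_not] at hd <;>
          omega
    · have h' : (pvR x).testBit i = false := by simpa using h
      simp [h']

theorem bitijada_eq (x : Int) : bitijada x =
    [PySem.Int.mod x 2,
     PySem.Int.mod (PySem.Int.floordiv x 2) 2,
     PySem.Int.mod (PySem.Int.floordiv (PySem.Int.floordiv x 2) 2) 2,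
     PySem.Int.mod (PySem.Int.floordiv (PySem.Int.floordiv (PySem.Int.floordiv x 2) 2) 2) 2,
     PySem.Int.mod (PySem.Int.floordiv (PySem.Int.floordiv (PySem.Int.floordiv (PySem.Int.floordiv x 2) 2) 2) 2) 2,
     PySem.Int.mod (PySem.Int.floordiv (PySem.Int.floordiv (PySem.Int.floordiv (PySem.Int.floordiv (PySem.Int.floordiv x 2) 2) 2) 2) 2) 2,
     PySem.Int.mod (PySem.Int.floordiv (PySem.Int.floordiv (PySem.Int.floordiv (PySem.Int.floordiv (PySem.Int.floordiv (PySem.Int.floordiv x 2) 2) 2) 2) 2) 2) 2,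
     PySem.Int.mod (PySem.Int.floordiv (PySem.Int.floordiv (PySem.Int.floordiv (PySem.Int.floordiv (PySem.Int.floordiv (PySem.Int.floordiv (PySem.Int.floordiv x 2) 2) 2) 2) 2) 2) 2) 2] := rfl

theorem pvtn0 : Int.toNat 0 = 0 := rfl
theorem pvtn1 : Int.toNat 1 = 1 := rfl
theorem pvtn2 : Int.toNat 2 = 2 := rfl
theorem pvtn3 : Int.toNat 3 = 3 := rfl
theorem pvtn4 : Int.toNat 4 = 4 := rfl
theorem pvtn5 : Int.toNat 5 = 5 := rfl
theorem pvtn6 : Int.toNat 6 = 6 := rfl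
theorem pvtn7 : Int.toNat 7 = 7 := rfl

theorem getbit (x : Int) (pos : Int) (h0 : 0 ≤ pos) (h8 : pos < 8) :
    (PySem.List.pyGet? (bitijada x) pos).getD 0
      = if (pvR x).testBit pos.toNat then 1 else 0 := by
  have hb := bitijada_eq x
  unfold pvR
  interval_cases pos <;>
    · rw [hb]
      norm_num [PySem.List.pyGet?, PySem.List.pyIdx?, pvtn0, pvtn1, pvtn2, pvtn3,
        pvtn4, pvtn5, pvtn6, pvtn7, List.getElem_cons_zero, List.getElem_cons_succ,
        Nat.testBit_eq_decide_div_mod_eq,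
        PySem.Int.mod_eq_emod_of_pos (show (0:Int) < 2 by norm_num),
        PySem.Int.mod_eq_emod_of_pos (show (0:Int) < 256 by norm_num),
        PySem.Int.floordiv_eq_ediv_of_pos (show (0:Int) < 2 by norm_num)]
      split_ifs <;> omega

theorem zero_helper (X : Nat) (hX : X < 256)
    (h0 : X.testBit 0 = false) (h1 : X.testBit 1 = false) (h2 : X.testBit 2 = false)
    (h3 : X.testBit 3 = false) (h4 : X.testBit 4 = false) (h5 : X.testBit 5 = false)
    (h6 : X.testBit 6 = false) (h7 : X.testBit 7 = false) : X = 0 := by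
  apply Nat.zero_of_testBit_eq_false
  intro i
  rcases Nat.lt_or_ge i 8 with h | h
  · interval_cases i <;> assumption
  · exact Nat.testBit_lt_two_pow (lt_of_lt_of_le hX (Nat.pow_le_pow_right (show 0 < 2 by norm_num) h))

theorem max_iff (X : Nat) (hX : X < 256) :
    ((PySem.List.max?
      [if X.testBit 0 then (1:Int) else 0, if X.testBit 1 then (1:Int) else 0,
       if X.testBit 2 then (1:Int) else 0, if X.testBit 3 then (1:Int) else 0,
       if X.testBit 4 then (1:Int) else 0, if X.testBit 5 then (1:Int) else 0,
       if X.testBit 6 then (1:Int) else 0, if X.testBit 7 then (1:Int) else 0]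
      (fun y => y)).getD 0 = 1) ↔ ¬ X = 0 := by
  have hne : ∀ i, X.testBit i = true → ¬ X = 0 := by
    intro i h hX0; subst hX0; simp at h
  cases h0 : X.testBit 0 <;> cases h1 : X.testBit 1 <;> cases h2 : X.testBit 2 <;>
    cases h3 : X.testBit 3 <;> cases h4 : X.testBit 4 <;> cases h5 : X.testBit 5 <;>
    cases h6 : X.testBit 6 <;> cases h7 : X.testBit 7 <;>
    first
      | exact iff_of_false (by decide)
          (fun hn => hn (zero_helper X hX h0 h1 h2 h3 h4 h5 h6 h7))
      | (refine iff_of_true (by decide) ?_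
         first
           | exact hne 0 h0 | exact hne 1 h1 | exact hne 2 h2 | exact hne 3 h3
           | exact hne 4 h4 | exact hne 5 h5 | exact hne 6 h6 | exact hne 7 h7)

theorem B_eq (seis : List Int) : kasvoiduseis_alt seis = decide (¬ pvX seis = 0) := by
  simp only [kasvoiduseis_alt]
  rw [show (0:Int) = ((0:Nat):Int) from rfl, alt_foldl]
  rw [decide_eq_decide]
  simp [pvX]

theorem A_eq (seis : List Int) : kasvoiduseis seis = decide (¬ pvX seis = 0) := by
  have hX := pvX_lt seis
  simp only [kasvoiduseis, seis2bitijada, PySem.List.foldl_append_singleton_eq_map,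
    List.nil_append]
  have hmap : (PySem.List.pyRange 0 pik 1).map
      (fun pos => PySem.Int.mod
        ((seis.map bitijada).foldl
          (fun summa jada => summa + (PySem.List.pyGet? jada pos).getD 0) 0) 2)
      = (PySem.List.pyRange 0 pik 1).map
        (fun pos => if (pvX seis).testBit pos.toNat then (1:Int) else 0) := by
    refine List.map_congr_left ?_
    intro pos hpos
    rw [PySem.List.mem_pyRange_one] at hpos
    have h0 : 0 ≤ pos := hpos.1
    have h8 : pos < 8 := hpos.2
    rw [PySem.List.foldl_add, List.map_map]
    have hinner : (seis.map ((fun jada => (PySem.List.pyGet? jada pos).getD 0) ∘ bitijada))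
        = seis.map (fun x => if (pvR x).testBit pos.toNat then (1:Int) else 0) := by
      refine List.map_congr_left ?_
      intro x _
      exact getbit x pos h0 h8
    rw [hinner, PySem.Int.mod_eq_emod_of_pos (show (0:Int) < 2 by norm_num)]
    have hp := parity_foldl pos.toNat seis 0
    simp only [Nat.zero_testBit, Bool.xor_false] at hp
    rw [show pvX seis = seis.foldl (fun a x => a ^^^ pvR x) 0 from rfl, hp]
    set s : Int := (seis.map (fun x => if (pvR x).testBit pos.toNat then (1:Int) else 0)).sum
    simp only [zero_add]
    by_cases hv : s % 2 = 1
    · simp [hv]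
    · simp only [hv, decide_false, Bool.false_eq_true, if_false]
      omega
  simp only [hmap]
  simp only [show PySem.List.pyRange 0 pik 1 = [0,1,2,3,4,5,6,7] from rfl,
    List.map_cons, List.map_nil, pvtn0, pvtn1, pvtn2, pvtn3, pvtn4, pvtn5, pvtn6, pvtn7]
  rw [decide_eq_decide]
  exact max_iff (pvX seis) hX

-- ===== VERDICT (by name: the statement is the Claim_ definition above) =====
theorem kasvoiduseis_spec : Claim_equal_kasvoiduseis := by
  intro seis _
  unfold Spec_kasvoiduseis
  rw [A_eq, B_eq]
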